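-- pv_equiv track=rewrite | github.com/zevlo/f1-telemetry-dashboard | lambdas/poller/handler.py | select_endpoints
-- ===== SOURCE A (Python) =====
-- ENDPOINT_CONFIGS = {
--     "position": {
--         "path": "/position",
--         "tier": "high",
--         "date_field": "date",
--         "partition_key_field": "driver_number",
--         "downsample": False,
--     },
--     "car_data": {
--         "path": "/car_data",
--         "tier": "high",
--         "date_field": "date",
--         "partition_key_field": "driver_number",
--         "downsample": True,
--     },
--     "laps": {
--         "path": "/laps",
--         "tier": "medium",
--         "date_field": "date_start",
--         "partition_key_field": "driver_number",
--         "downsample": False,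
--     },
--     "race_control": {
--         "path": "/race_control",
--         "tier": "low",
--         "date_field": "date",
--         "partition_key_field": None,
--         "downsample": False,
--     },
--     "weather": {
--         "path": "/weather",
--         "tier": "low",
--         "date_field": "date",
--         "partition_key_field": None,
--         "downsample": False,
--     },
--     "pit": {
--         "path": "/pit",
--         "tier": "low",
--         "date_field": "date",
--         "partition_key_field": "driver_number",
--         "downsample": False,
--     },
-- }
--
-- def select_endpoints(invocation_count):
--     """Choose which endpoints to poll this cycle based on rotation schedule."""
--     endpoints = []
--     for name, config in ENDPOINT_CONFIGS.items():
--         tier = config["tier"]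
--         if tier == "high":
--             endpoints.append(name)
--         elif tier == "medium" and invocation_count % 3 == 0:
--             endpoints.append(name)
--         elif tier == "low" and invocation_count % 6 == 0:
--             endpoints.append(name)
--     return endpoints
-- ===== SOURCE B (Python) =====
-- ENDPOINT_CONFIGS = {
--     "position": {"path": "/position", "tier": "high", "date_field": "date", "partition_key_field": "driver_number", "downsample": False},
--     "car_data": {"path": "/car_data", "tier": "high", "date_field": "date", "partition_key_field": "driver_number", "downsample": True},
--     "laps": {"path": "/laps", "tier": "medium", "date_field": "date_start", "partition_key_field": "driver_number", "downsample": False},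
--     "race_control": {"path": "/race_control", "tier": "low", "date_field": "date", "partition_key_field": None, "downsample": False},
--     "weather": {"path": "/weather", "tier": "low", "date_field": "date", "partition_key_field": None, "downsample": False},
--     "pit": {"path": "/pit", "tier": "low", "date_field": "date", "partition_key_field": "driver_number", "downsample": False},
-- }
--
-- # The rotation has period 6, so every possible answer is precomputed once at module
-- # load as a 6-slot schedule; each call is just a modular table lookup.
-- # Tiers occupy contiguous blocks of ENDPOINT_CONFIGS (high, high, medium, low, low,
-- # low), so concatenating the per-tier groups reproduces insertion order exactly.
-- _GROUPS = {"high": [], "medium": [], "low": []}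
-- for _name, _cfg in ENDPOINT_CONFIGS.items():
--     _GROUPS[_cfg["tier"]].append(_name)
--
-- _ROTATION = [
--     _GROUPS["high"]
--     + (_GROUPS["medium"] if _r % 3 == 0 else [])
--     + (_GROUPS["low"] if _r == 0 else [])
--     for _r in range(6)
-- ]
--
--
-- def select_endpoints(invocation_count):
--     """Choose which endpoints to poll this cycle based on rotation schedule."""
--     return list(_ROTATION[invocation_count % 6])
-- ===== Notes on version B (the rewrite author's own statement) =====
-- stated objective: alternative
-- what changed: Instead of filtering the endpoint table on every call, B precomputes once (at module load) the complete rotation schedule, one slot per residue of the cycle length, by grouping names per tier; each call is then a single modular table lookup into _ROTATION.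
import Mathlib
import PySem

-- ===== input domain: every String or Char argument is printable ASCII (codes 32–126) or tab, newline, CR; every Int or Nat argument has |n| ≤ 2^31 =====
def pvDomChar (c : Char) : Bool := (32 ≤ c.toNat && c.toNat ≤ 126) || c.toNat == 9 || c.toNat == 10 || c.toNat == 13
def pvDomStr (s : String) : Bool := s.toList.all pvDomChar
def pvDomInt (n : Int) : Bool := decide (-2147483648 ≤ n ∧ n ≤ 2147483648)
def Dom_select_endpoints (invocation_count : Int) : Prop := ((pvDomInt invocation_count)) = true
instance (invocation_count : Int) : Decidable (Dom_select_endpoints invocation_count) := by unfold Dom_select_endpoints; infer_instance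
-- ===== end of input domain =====

-- B replaces A's per-call filtering loop by a 6-slot pollRotation schedule precomputed
-- from per-tier groups; each call is one modular table lookup (objective: alternative).

-- Config record: the ENDPOINT_CONFIGS values (partition_key_field None → Option String).
structure EndpointConfig where
  path : String
  tier : String
  date_field : String
  partition_key_field : Option String
  downsample : Bool
deriving DecidableEq, Repr

-- ENDPOINT_CONFIGS as an association list in insertion order.
def endpointConfigs : List (String × EndpointConfig) :=
  [ ("position",     ⟨"/position", "high", "date", some "driver_number", false⟩),
    ("car_data",     ⟨"/car_data", "high", "date", some "driver_number", true⟩),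
    ("laps",         ⟨"/laps", "medium", "date_start", some "driver_number", false⟩),
    ("race_control", ⟨"/race_control", "low", "date", none, false⟩),
    ("weather",      ⟨"/weather", "low", "date", none, false⟩),
    ("pit",          ⟨"/pit", "low", "date", some "driver_number", false⟩) ]

-- ===== PORT A =====
def select_endpoints (invocation_count : Int) : List String :=
  endpointConfigs.foldl (fun endpoints nc =>
    let tier := nc.2.tier
    if tier == "high" then endpoints ++ [nc.1]
    else if tier == "medium" && PySem.Int.mod invocation_count 3 == 0 then endpoints ++ [nc.1]
    else if tier == "low" && PySem.Int.mod invocation_count 6 == 0 then endpoints ++ [nc.1]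
    else endpoints) []

-- ===== PORT B =====
-- _GROUPS: dict with the three tiers pre-inserted; names appended per tier in one pass.
def tierGroups : PySem.Dict String (List String) :=
  endpointConfigs.foldl (fun g nc => g.modify nc.2.tier [] (· ++ [nc.1]))
    (PySem.Dict.ofList [("high", []), ("medium", []), ("low", [])])

-- _ROTATION: the schedule for each residue r = invocation_count % 6.
def pollRotation : List (List String) :=
  (PySem.List.pyRange 0 6 1).map (fun r =>
    tierGroups.getD "high" []
    ++ (if PySem.Int.mod r 3 == 0 then tierGroups.getD "medium" [] else [])
    ++ (if r == 0 then tierGroups.getD "low" [] else []))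

def select_endpoints_alt (invocation_count : Int) : List String :=
  -- index invocation_count % 6 lies in [0,6), so Python's _ROTATION[...] never raises;
  -- pyGetD with default [] is exact here.
  PySem.List.pyGetD pollRotation (PySem.Int.mod invocation_count 6) []

-- ===== PRECONDITION & SPEC =====
def Spec_select_endpoints (invocation_count : Int) (out : List String) : Prop := out = select_endpoints_alt invocation_count
instance (invocation_count : Int) (out : List String) : Decidable (Spec_select_endpoints invocation_count out) := by unfold Spec_select_endpoints; infer_instance

-- ===== CLAIM (what is proved, stated in full; the proofs are below) =====
def Claim_equal_select_endpoints : Prop := ∀ (invocation_count : Int), Dom_select_endpoints invocation_count → Spec_select_endpoints invocation_count (select_endpoints invocation_count)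

-- ===== LEMMAS AND PROOFS =====
theorem pymod_eq_emod (a : Int) (b : Int) (hb : 0 < b) : PySem.Int.mod a b = a % b :=
  PySem.Int.mod_eq_emod_of_pos hb

-- Both sides depend only on n % 6 (which fixes n % 3 = (n % 6) % 3).
theorem select_both_of_mod6 (n : Int) (r : Int) (h6 : n % 6 = r) (h3 : n % 3 = r % 3) :
    select_endpoints n = select_endpoints_alt n := by
  unfold select_endpoints select_endpoints_alt
  rw [pymod_eq_emod n 3 (by norm_num), pymod_eq_emod n 6 (by norm_num), h3, h6]
  have hr : r = 0 ∨ r = 1 ∨ r = 2 ∨ r = 3 ∨ r = 4 ∨ r = 5 := by omega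
  rcases hr with h | h | h | h | h | h <;> subst h <;> decide

-- ===== VERDICT (by name: the statement is the Claim_ definition above) =====
theorem select_endpoints_spec : Claim_equal_select_endpoints := by
  intro n _
  unfold Spec_select_endpoints
  exact select_both_of_mod6 n (n % 6) rfl (by omega)
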